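-- pv_equiv track=rewrite | github.com/tanaya-jadhav/OpticalMapping | telomereIDs.py | getmatchedIntensities
-- ===== SOURCE A (Python) =====
-- def getmatchedIntensities(intensities, matchedSNRs):
--     inten_site = 0
--     matchedInten = []
--     for inten in intensities:
--         inten_site = inten_site + 1
--         if inten_site in matchedSNRs and float(inten) > 5:
--             matchedInten.append(inten_site)
--     return matchedInten
-- ===== SOURCE B (Python) =====
-- def getmatchedIntensities(intensities, matchedSNRs):
--     vals = list(intensities)
--     cand = sorted({i for i in matchedSNRs if 1 <= i <= len(vals)})
--     return [i for i in cand if float(vals[i - 1]) > 5]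
-- ===== Notes on version B (the rewrite author's own statement) =====
-- stated objective: alternative
-- what changed: Instead of scanning every intensity and testing its 1-based position against matchedSNRs, B builds the deduplicated in-range candidate index set from matchedSNRs, sorts it, and checks only those positions by direct indexing into the intensity list.
import Mathlib
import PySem

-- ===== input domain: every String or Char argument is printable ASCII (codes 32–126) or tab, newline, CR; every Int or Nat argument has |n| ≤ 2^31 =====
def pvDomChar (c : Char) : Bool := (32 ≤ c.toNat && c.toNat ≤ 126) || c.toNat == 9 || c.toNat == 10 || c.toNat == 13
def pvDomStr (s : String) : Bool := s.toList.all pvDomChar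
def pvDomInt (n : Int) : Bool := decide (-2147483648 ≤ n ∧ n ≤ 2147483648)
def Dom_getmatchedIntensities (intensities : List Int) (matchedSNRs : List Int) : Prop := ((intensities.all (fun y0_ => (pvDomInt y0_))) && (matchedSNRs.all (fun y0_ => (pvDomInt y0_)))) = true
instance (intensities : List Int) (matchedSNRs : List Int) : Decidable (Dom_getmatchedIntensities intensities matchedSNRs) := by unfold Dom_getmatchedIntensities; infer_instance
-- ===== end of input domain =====

-- B drives the computation off matchedSNRs instead of the intensity list: it sorts the
-- deduplicated in-range candidate indices from matchedSNRs and probes the intensity list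
-- directly at those positions (objective: alternative).

-- ===== PORT A =====
-- literal transliteration of A's loop: a counter and an accumulator threaded through the list;
-- float(inten) > 5 on an int is exactly inten > 5
def getmatchedIntensities (intensities : List Int) (matchedSNRs : List Int) : List Int :=
  (intensities.foldl
    (fun (st : Int × List Int) inten =>
      let inten_site := st.1 + 1
      if matchedSNRs.contains inten_site && decide (inten > 5)
      then (inten_site, st.2 ++ [inten_site])
      else (inten_site, st.2))
    (0, [])).2

-- ===== PORT B =====
-- transliteration of Source B: set comprehension → PySem.Set.ofList of the filtered list,
-- sorted → PySem.List.sorted; vals[i-1] → pyGet? (always in range since 1 ≤ i ≤ len vals, exact)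
def getmatchedIntensities_alt (intensities : List Int) (matchedSNRs : List Int) : List Int :=
  let vals := intensities
  let cand := PySem.List.sorted
      (PySem.Set.ofList (matchedSNRs.filter (fun i => decide (1 ≤ i) && decide (i ≤ (vals.length : Int)))))
      (fun x => x) false
  cand.filter (fun i => decide (((PySem.List.pyGet? vals (i - 1)).getD 0) > 5))

-- ===== PRECONDITION & SPEC =====
def Spec_getmatchedIntensities (intensities : List Int) (matchedSNRs : List Int) (out : List Int) : Prop := out = getmatchedIntensities_alt intensities matchedSNRs
instance (intensities : List Int) (matchedSNRs : List Int) (out : List Int) : Decidable (Spec_getmatchedIntensities intensities matchedSNRs out) := by unfold Spec_getmatchedIntensities; infer_instance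

-- ===== CLAIM (what is proved, stated in full; the proofs are below) =====
def Claim_equal_getmatchedIntensities : Prop := ∀ (intensities : List Int) (matchedSNRs : List Int), Dom_getmatchedIntensities intensities matchedSNRs → Spec_getmatchedIntensities intensities matchedSNRs (getmatchedIntensities intensities matchedSNRs)

-- ===== LEMMAS AND PROOFS =====

-- the indices A's loop appends when the counter starts at c
def pvAux (ms : List Int) : List Int → Int → List Int
  | [], _ => []
  | v :: t, c => (if (c + 1) ∈ ms ∧ v > 5 then [c + 1] else []) ++ pvAux ms t (c + 1)

theorem pvAux_foldl (ms : List Int) (vals : List Int) :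
    ∀ (c : Int) (acc : List Int),
      vals.foldl
        (fun (st : Int × List Int) inten =>
          let inten_site := st.1 + 1
          if ms.contains inten_site && decide (inten > 5)
          then (inten_site, st.2 ++ [inten_site])
          else (inten_site, st.2))
        (c, acc)
      = (c + vals.length, acc ++ pvAux ms vals c) := by
  induction vals with
  | nil => intro c acc; simp [pvAux]
  | cons v t ih =>
      intro c acc
      rw [List.foldl_cons]
      by_cases hp : (c + 1) ∈ ms ∧ v > 5
      · have hb : (ms.contains (c + 1) && decide (v > 5)) = true := by
          simp only [Bool.and_eq_true, decide_eq_true_eq, List.contains_eq_mem]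
          exact ⟨by simpa using hp.1, hp.2⟩
        show t.foldl _ (if ms.contains (c + 1) && decide (v > 5)
            then (c + 1, acc ++ [c + 1]) else (c + 1, acc)) = _
        rw [if_pos hb, ih (c + 1) (acc ++ [c + 1])]
        refine Prod.ext ?_ ?_
        · show c + 1 + (t.length : Int) = c + ((v :: t).length : Int)
          simp; ring
        · show acc ++ [c + 1] ++ pvAux ms t (c + 1) = acc ++ pvAux ms (v :: t) c
          simp [pvAux, hp]
      · have hb : (ms.contains (c + 1) && decide (v > 5)) = false := by
          rcases Decidable.not_and_iff_not_or_not.1 hp with h | h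
          · simp [List.contains_eq_mem, h]
          · simp [h]
        show t.foldl _ (if ms.contains (c + 1) && decide (v > 5)
            then (c + 1, acc ++ [c + 1]) else (c + 1, acc)) = _
        rw [hb]
        show t.foldl _ (c + 1, acc) = _
        rw [ih (c + 1) acc]
        refine Prod.ext ?_ ?_
        · show c + 1 + (t.length : Int) = c + ((v :: t).length : Int)
          simp; ring
        · show acc ++ pvAux ms t (c + 1) = acc ++ pvAux ms (v :: t) c
          simp [pvAux, hp]

theorem pvAux_mem (ms : List Int) (vals : List Int) :
    ∀ (c : Int) (i : Int),
      i ∈ pvAux ms vals c ↔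
        (c < i ∧ i ∈ ms ∧
          ∃ v, vals[(i - (c + 1)).toNat]? = some v ∧ v > 5) := by
  induction vals with
  | nil => intro c i; simp [pvAux]
  | cons v t ih =>
      intro c i
      simp only [pvAux, List.mem_append]
      constructor
      · intro h
        rcases h with h | h
        · by_cases hp : (c + 1) ∈ ms ∧ v > 5
          · rw [if_pos hp] at h
            simp at h
            subst h
            refine ⟨by omega, hp.1, v, ?_, hp.2⟩
            have h0 : (c + 1 - (c + 1)).toNat = 0 := by omega
            simp [h0]
          · rw [if_neg hp] at h
            simp at h
        · rcases (ih (c + 1) i).1 h with ⟨h1, h2, w, h3, h4⟩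
          refine ⟨by omega, h2, w, ?_, h4⟩
          have hs : (i - (c + 1)).toNat = (i - (c + 1 + 1)).toNat + 1 := by omega
          rw [hs]
          simpa using h3
      · rintro ⟨h1, h2, w, h3, h4⟩
        by_cases hi : i = c + 1
        · subst hi
          have h0 : (c + 1 - (c + 1)).toNat = 0 := by omega
          rw [h0] at h3
          simp at h3
          subst h3
          left
          rw [if_pos ⟨h2, h4⟩]
          simp
        · right
          apply (ih (c + 1) i).2
          refine ⟨by omega, h2, w, ?_, h4⟩
          have hs : (i - (c + 1)).toNat = (i - (c + 1 + 1)).toNat + 1 := by omega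
          rw [hs] at h3
          simpa using h3

theorem pvAux_gt (ms : List Int) (vals : List Int) (c : Int) (i : Int)
    (h : i ∈ pvAux ms vals c) : c < i :=
  ((pvAux_mem ms vals c i).1 h).1

theorem pvAux_pairwise (ms : List Int) (vals : List Int) :
    ∀ (c : Int), (pvAux ms vals c).Pairwise (· < ·) := by
  induction vals with
  | nil => intro c; simp [pvAux]
  | cons v t ih =>
      intro c
      simp only [pvAux]
      by_cases hp : (c + 1) ∈ ms ∧ v > 5
      · rw [if_pos hp]
        simp only [List.singleton_append]
        refine List.pairwise_cons.2 ⟨?_, ih (c + 1)⟩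
        intro b hb
        exact pvAux_gt ms t (c + 1) b hb
      · rw [if_neg hp]
        simpa using ih (c + 1)

theorem eq_of_pairwise_lt_of_mem_iff (l1 l2 : List Int)
    (h1 : l1.Pairwise (· < ·)) (h2 : l2.Pairwise (· < ·))
    (hm : ∀ x, x ∈ l1 ↔ x ∈ l2) : l1 = l2 := by
  have n1 : l1.Nodup := h1.imp (fun h => ne_of_lt h)
  have n2 : l2.Nodup := h2.imp (fun h => ne_of_lt h)
  have hperm : l2.Perm l1 := by
    apply List.perm_of_nodup_nodup_toFinset_eq n2 n1
    ext x
    simp [hm x]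
  have e1 := PySem.List.sorted_eq_of_perm_of_pairwise_lt l1 l1 (fun x => x) (List.Perm.refl l1) h1
  have e2 := PySem.List.sorted_eq_of_perm_of_pairwise_lt l1 l2 (fun x => x) hperm h2
  rw [← e1, e2]

-- ===== VERDICT (by name: the statement is the Claim_ definition above) =====
theorem getmatchedIntensities_spec : Claim_equal_getmatchedIntensities := by
  intro intensities matchedSNRs _hdom
  unfold Spec_getmatchedIntensities
  show getmatchedIntensities intensities matchedSNRs = getmatchedIntensities_alt intensities matchedSNRs
  unfold getmatchedIntensities getmatchedIntensities_alt
  rw [pvAux_foldl]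
  simp only [List.nil_append]
  apply eq_of_pairwise_lt_of_mem_iff
  · exact pvAux_pairwise matchedSNRs intensities 0
  · exact (PySem.List.sorted_ofList_pairwise_lt _).filter _
  · intro x
    rw [pvAux_mem]
    simp only [List.mem_filter, PySem.List.mem_sorted, PySem.Set.mem_ofList]
    constructor
    · rintro ⟨h1, h2, v, h3, h4⟩
      have h3' : intensities[(x - 1).toNat]? = some v := by
        have hs : (x - (0 + 1)).toNat = (x - 1).toNat := by omega
        rw [hs] at h3
        exact h3
      have hlt : (x - 1).toNat < intensities.length :=
        (List.getElem?_eq_some_iff.1 h3').1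
      refine ⟨⟨by simpa using h2, ?_⟩, ?_⟩
      · simp
        omega
      · have hg : PySem.List.pyGet? intensities (x - 1) = some v := by
          rw [PySem.List.pyGet?_of_nonneg intensities (show (0:Int) ≤ x - 1 by omega)]
          exact h3'
        simp [hg, h4]
    · rintro ⟨hmemf, hq⟩
      obtain ⟨hmem, hrange⟩ := hmemf
      simp only [Bool.and_eq_true, decide_eq_true_eq] at hrange
      obtain ⟨hx1, hx2⟩ := hrange
      have hlt : (x - 1).toNat < intensities.length := by omega
      have hsome : PySem.List.pyGet? intensities (x - 1)
          = some intensities[(x - 1).toNat] := by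
        rw [PySem.List.pyGet?_of_nonneg intensities (show (0:Int) ≤ x - 1 by omega)]
        exact List.getElem?_eq_getElem hlt
      rw [hsome] at hq
      simp only [Option.getD_some, decide_eq_true_eq] at hq
      refine ⟨by omega, hmem, intensities[(x - 1).toNat], ?_, hq⟩
      have hs : (x - (0 + 1)).toNat = (x - 1).toNat := by omega
      rw [hs]
      exact List.getElem?_eq_getElem hlt
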